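-- pv_equiv track=rewrite | github.com/ZhuJiaqi9905/Oobleck | exp/run_exps.py | get_nodes_and_ports
-- ===== SOURCE A (Python) =====
-- NODE_IPS = ["172.31.10.88", "172.31.8.235"]
--
-- NODE_PORTS = ["2220", "2221", "2222", "2223", "2224", "2225", "2226", "2227"]
--
-- def get_nodes_and_ports(world_size: int) -> tuple[list[str], list[str]]:
--     nodes = []
--     ports = []
--     # ports = []
--
--     node_nums = len(NODE_IPS)
--
--     batch = world_size // node_nums
--
--     if world_size % node_nums != 0:
--         batch += 1
--     port_idx = 0
--     i = 0
--     for node_idx in range(node_nums):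
--         for port_idx in range(batch):
--             nodes.append(NODE_IPS[node_idx])
--             ports.append(NODE_PORTS[port_idx])
--             # ports.append(NODE_PORTS[port_idx])
--             i += 1
--             if i == world_size:
--                 return (nodes, ports)
--     return (nodes, ports)
-- ===== SOURCE B (Python) =====
-- NODE_IPS = ["172.31.10.88", "172.31.8.235"]
--
-- NODE_PORTS = ["2220", "2221", "2222", "2223", "2224", "2225", "2226", "2227"]
--
-- def get_nodes_and_ports(world_size: int) -> tuple[list[str], list[str]]:
--     # Every global rank i lands on node i // batch, port slot i % batch:
--     # one flat pass of index arithmetic instead of nested loops with an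
--     # early-return counter.  (NODE_PORTS[i % batch] still raises IndexError
--     # for world_size >= 17, exactly as the original.)
--     node_nums = len(NODE_IPS)
--     batch = world_size // node_nums
--     if world_size % node_nums != 0:
--         batch += 1
--     nodes = [NODE_IPS[i // batch] for i in range(world_size)]
--     ports = [NODE_PORTS[i % batch] for i in range(world_size)]
--     return (nodes, ports)
-- ===== Notes on version B (the rewrite author's own statement) =====
-- stated objective: simpler
-- what changed: Replaced A's nested node/port loops with a running counter and mid-loop early return by a single flat pass over range(world_size) that places each rank with index arithmetic (node i//batch, port i%batch).
-- outside the precondition, e.g. on get_nodes_and_ports(17): A raises IndexError, B raises IndexError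
import Mathlib
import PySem

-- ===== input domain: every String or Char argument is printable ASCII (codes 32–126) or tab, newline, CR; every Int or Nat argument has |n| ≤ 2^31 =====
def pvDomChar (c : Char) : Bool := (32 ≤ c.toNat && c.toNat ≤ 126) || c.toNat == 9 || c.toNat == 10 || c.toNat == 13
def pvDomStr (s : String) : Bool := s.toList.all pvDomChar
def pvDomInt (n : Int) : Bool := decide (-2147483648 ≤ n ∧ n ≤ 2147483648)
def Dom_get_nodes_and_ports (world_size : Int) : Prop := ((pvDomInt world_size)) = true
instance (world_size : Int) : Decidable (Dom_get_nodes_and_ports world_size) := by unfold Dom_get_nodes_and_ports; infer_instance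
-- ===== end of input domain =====

-- B replaces A's nested node/port loops with early-return counter by one flat pass of
-- index arithmetic (node i//batch, port i%batch); objective: simpler.


-- ===== PORT A =====
def NODE_IPS : List String := ["172.31.10.88", "172.31.8.235"]

def NODE_PORTS : List String := ["2220", "2221", "2222", "2223", "2224", "2225", "2226", "2227"]

-- inner 'for port_idx in range(batch)' loop with the early return (i == world_size);
-- `.inl` is the early return, `.inr` carries the loop state on.  Indexing uses
-- PySem.List.pyGet? with `.getD ""`; the out-of-range (IndexError) case is excluded by Pre_.
def pvLoopInnerA (nodeIdx ws : Int) :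
    List Int → List String × List String × Int → Sum (List String × List String) (List String × List String × Int)
  | [], st => .inr st
  | p :: ps, (nodes, ports, i) =>
    let nodes := nodes ++ [(PySem.List.pyGet? NODE_IPS nodeIdx).getD ""]
    let ports := ports ++ [(PySem.List.pyGet? NODE_PORTS p).getD ""]
    let i := i + 1
    if i == ws then .inl (nodes, ports) else pvLoopInnerA nodeIdx ws ps (nodes, ports, i)

-- outer 'for node_idx in range(node_nums)' loop
def pvLoopOuterA (batch ws : Int) :
    List Int → List String × List String × Int → List String × List String
  | [], (nodes, ports, _) => (nodes, ports)
  | n :: ns, st =>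
    match pvLoopInnerA n ws (PySem.List.pyRange 0 batch 1) st with
    | .inl res => res
    | .inr st' => pvLoopOuterA batch ws ns st'

def get_nodes_and_ports (world_size : Int) : List String × List String :=
  let node_nums : Int := NODE_IPS.length
  let batch := PySem.Int.floordiv world_size node_nums
  let batch := if PySem.Int.mod world_size node_nums ≠ 0 then batch + 1 else batch
  pvLoopOuterA batch world_size (PySem.List.pyRange 0 node_nums 1) ([], [], 0)

-- ===== PORT B =====
def get_nodes_and_ports_alt (world_size : Int) : List String × List String :=
  let node_nums : Int := NODE_IPS.length
  let batch0 := PySem.Int.floordiv world_size node_nums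
  let batch := if PySem.Int.mod world_size node_nums ≠ 0 then batch0 + 1 else batch0
  let idxs := PySem.List.pyRange 0 world_size 1
  (idxs.map (fun i => (PySem.List.pyGet? NODE_IPS (PySem.Int.floordiv i batch)).getD ""),
   idxs.map (fun i => (PySem.List.pyGet? NODE_PORTS (PySem.Int.mod i batch)).getD ""))

-- ===== PRECONDITION & SPEC =====
-- Python A raises IndexError on NODE_PORTS[8] exactly when world_size ≥ 17; it returns normally
-- on every world_size ≤ 16 (negative or zero gives ([], [])).
def Pre_get_nodes_and_ports (world_size : Int) : Prop := world_size ≤ 16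
instance (world_size : Int) : Decidable (Pre_get_nodes_and_ports world_size) := by unfold Pre_get_nodes_and_ports; infer_instance
def pvWitness_get_nodes_and_ports : Int := (7)

def Spec_get_nodes_and_ports (world_size : Int) (out : List String × List String) : Prop := out = get_nodes_and_ports_alt world_size
instance (world_size : Int) (out : List String × List String) : Decidable (Spec_get_nodes_and_ports world_size out) := by unfold Spec_get_nodes_and_ports; infer_instance

-- ===== CLAIM (what is proved, stated in full; the proofs are below) =====
def Claim_equal_get_nodes_and_ports : Prop := ∀ (world_size : Int), Dom_get_nodes_and_ports world_size → Pre_get_nodes_and_ports world_size → Spec_get_nodes_and_ports world_size (get_nodes_and_ports world_size)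

-- ===== LEMMAS AND PROOFS =====

-- A on a nonpositive world_size: batch ≤ 0, so the inner range is empty and nothing is appended.
theorem pvA_nonpos (ws : Int) (h : ws ≤ 0) : get_nodes_and_ports ws = ([], []) := by
  unfold get_nodes_and_ports
  have h2 : PySem.Int.floordiv ws 2 = ws / 2 := PySem.Int.floordiv_eq_ediv_of_pos (by omega)
  have hm : PySem.Int.mod ws 2 = ws % 2 := PySem.Int.mod_eq_emod_of_pos (by omega)
  norm_num [NODE_IPS]
  have hrange : ∀ b : Int, b ≤ 0 → PySem.List.pyRange 0 b 1 = [] := by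
    intro b hb
    simp [PySem.List.pyRange]
    omega
  have hr2 : PySem.List.pyRange 0 2 1 = [0, 1] := by decide
  by_cases hz : ws % 2 = 0
  · have hb : ws / 2 ≤ 0 := by omega
    rw [if_neg (by omega), hr2]
    simp [pvLoopOuterA, hrange _ hb, pvLoopInnerA]
  · have hb : ws / 2 + 1 ≤ 0 := by omega
    rw [if_pos (by omega), hr2]
    simp [pvLoopOuterA, hrange _ hb, pvLoopInnerA]

theorem pvB_nonpos (ws : Int) (h : ws ≤ 0) : get_nodes_and_ports_alt ws = ([], []) := by
  unfold get_nodes_and_ports_alt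
  have hrange : PySem.List.pyRange 0 ws 1 = [] := by
    simp [PySem.List.pyRange]
    omega
  simp [hrange]

-- ===== VERDICT (by name: the statement is the Claim_ definition above) =====
theorem get_nodes_and_ports_spec : Claim_equal_get_nodes_and_ports := by
  intro ws _ hpre
  unfold Spec_get_nodes_and_ports
  unfold Pre_get_nodes_and_ports at hpre
  by_cases hp : 1 ≤ ws
  · interval_cases ws <;> decide
  · rw [pvA_nonpos ws (by omega), pvB_nonpos ws (by omega)]
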